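-- pv_equiv track=rewrite | github.com/IqbalLx/indonesian-news-extrator | utils/ner.py | postpro
-- ===== SOURCE A (Python) =====
-- def postpro(entities):
--     selected_type = ["ORG", "PER"]
--     date_type = "DTE"
--
--     used_name = set()
--
--     qualified_entities = []
--     date_entities = []
--     for entity in entities:
--         entity_type = entity.get("type")
--         entity_name = entity.get("name")
--         if entity_type in selected_type:
--             if entity_name not in used_name:
--                 qualified_entities.append(entity)
--
--         elif entity_type == date_type:
--             if entity_name not in used_name:
--                 date_entities.append(entity)
--
--         used_name.add(entity_name)
--
--     return qualified_entities, date_entities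
-- ===== SOURCE B (Python) =====
-- def postpro(entities):
--     # one global dedup pass (first occurrence of each name wins), then split by type
--     seen = set()
--     deduped = []
--     for e in entities:
--         name = e.get("name")
--         if name not in seen:
--             seen.add(name)
--             deduped.append(e)
--     qualified_entities = [e for e in deduped if e.get("type") in ("ORG", "PER")]
--     date_entities = [e for e in deduped if e.get("type") == "DTE"]
--     return qualified_entities, date_entities
-- ===== Notes on version B (the rewrite author's own statement) =====
-- stated objective: simpler
-- what changed: Replaces the single loop that interleaves seen-name bookkeeping with per-type branching by one global first-occurrence dedup pass followed by two plain type filters over the deduped list.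
import Mathlib
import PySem

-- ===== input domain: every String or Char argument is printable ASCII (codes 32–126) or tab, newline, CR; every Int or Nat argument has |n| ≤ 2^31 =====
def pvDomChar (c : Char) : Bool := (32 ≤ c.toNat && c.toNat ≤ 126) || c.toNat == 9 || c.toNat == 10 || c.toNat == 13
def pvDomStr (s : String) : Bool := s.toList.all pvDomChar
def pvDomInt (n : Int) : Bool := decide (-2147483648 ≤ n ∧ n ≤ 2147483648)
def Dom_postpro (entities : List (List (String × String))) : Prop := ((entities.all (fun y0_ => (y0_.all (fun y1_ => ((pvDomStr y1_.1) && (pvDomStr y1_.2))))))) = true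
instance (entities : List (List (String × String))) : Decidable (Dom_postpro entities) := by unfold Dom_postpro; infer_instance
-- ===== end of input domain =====

-- B replaces A's single loop (per-type branching interleaved with seen-name bookkeeping)
-- by one global first-occurrence dedup pass followed by two plain type filters: simpler.

-- ===== PORT A =====
-- loop body of A: state = (used_name, qualified_entities, date_entities)
def pvAStep (st : PySem.Set (Option String) × List (List (String × String)) × List (List (String × String)))
    (entity : List (String × String)) :
    PySem.Set (Option String) × List (List (String × String)) × List (List (String × String)) :=
  let et := List.lookup "type" entity
  let en := List.lookup "name" entity
  let qd :=
    if (et == some "ORG") || (et == some "PER") then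
      if PySem.Set.contains st.1 en then (st.2.1, st.2.2) else (st.2.1 ++ [entity], st.2.2)
    else if et == some "DTE" then
      if PySem.Set.contains st.1 en then (st.2.1, st.2.2) else (st.2.1, st.2.2 ++ [entity])
    else (st.2.1, st.2.2)
  (PySem.Set.add st.1 en, qd.1, qd.2)

def postpro (entities : List (List (String × String))) : (List (List (String × String))) × (List (List (String × String))) :=
  let st := entities.foldl pvAStep (PySem.Set.empty, [], [])
  (st.2.1, st.2.2)

-- ===== PORT B =====
-- dedup pass of B: state = (seen, deduped)
def pvBStep (st : PySem.Set (Option String) × List (List (String × String)))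
    (e : List (String × String)) :
    PySem.Set (Option String) × List (List (String × String)) :=
  let name := List.lookup "name" e
  if PySem.Set.contains st.1 name then st
  else (PySem.Set.add st.1 name, st.2 ++ [e])

def pvIsQual (e : List (String × String)) : Bool :=
  (List.lookup "type" e == some "ORG") || (List.lookup "type" e == some "PER")

def pvIsDte (e : List (String × String)) : Bool :=
  List.lookup "type" e == some "DTE"

def postpro_alt (entities : List (List (String × String))) : (List (List (String × String))) × (List (List (String × String))) :=
  let st := entities.foldl pvBStep (PySem.Set.empty, [])
  (st.2.filter pvIsQual, st.2.filter pvIsDte)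

-- ===== PRECONDITION & SPEC =====
def Spec_postpro (entities : List (List (String × String))) (out : (List (List (String × String))) × (List (List (String × String)))) : Prop := out = postpro_alt entities
instance (entities : List (List (String × String))) (out : (List (List (String × String))) × (List (List (String × String)))) : Decidable (Spec_postpro entities out) := by unfold Spec_postpro; infer_instance

-- ===== CLAIM (what is proved, stated in full; the proofs are below) =====
def Claim_equal_postpro : Prop := ∀ (entities : List (List (String × String))), Dom_postpro entities → Spec_postpro entities (postpro entities)

-- ===== LEMMAS AND PROOFS =====

-- B's fold with a nonempty deduped accumulator just prefixes it
lemma pvB_acc (l : List (List (String × String))) :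
    ∀ (seen : PySem.Set (Option String)) (ded : List (List (String × String))),
    l.foldl pvBStep (seen, ded) =
      ((l.foldl pvBStep (seen, ([] : List (List (String × String))))).1,
       ded ++ (l.foldl pvBStep (seen, ([] : List (List (String × String))))).2) := by
  induction l with
  | nil => intro seen ded; simp
  | cons e l ih =>
    intro seen ded
    simp only [List.foldl_cons, pvBStep]
    by_cases h : PySem.Set.contains seen (List.lookup "name" e)
    · rw [if_pos h, if_pos h]
      exact ih seen ded
    · rw [if_neg h, if_neg h]
      rw [ih _ (ded ++ [e]), ih _ ([] ++ [e])]
      simp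

-- main invariant: A's fold is B's dedup fold followed by the two filters, appended to the accumulators
lemma pvMain (l : List (List (String × String))) :
    ∀ (seen : PySem.Set (Option String)) (q d : List (List (String × String))),
    l.foldl pvAStep (seen, q, d) =
      ((l.foldl pvBStep (seen, ([] : List (List (String × String))))).1,
       q ++ ((l.foldl pvBStep (seen, ([] : List (List (String × String))))).2).filter pvIsQual,
       d ++ ((l.foldl pvBStep (seen, ([] : List (List (String × String))))).2).filter pvIsDte) := by
  induction l with
  | nil => intro seen q d; simp
  | cons e l ih =>
    intro seen q d
    simp only [List.foldl_cons, pvAStep, pvBStep]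
    by_cases hc : PySem.Set.contains seen (List.lookup "name" e)
    · have hadd : PySem.Set.add seen (List.lookup "name" e) = seen :=
        PySem.Set.add_of_mem (List.mem_of_elem_eq_true hc)
      simp only [hc, if_true, hadd]
      split <;> simp [ih]
    · simp only [hc, Bool.false_eq_true, if_false]
      rw [pvB_acc l (PySem.Set.add seen (List.lookup "name" e)) ([] ++ [e])]
      by_cases hq : ((List.lookup "type" e == some "ORG") || (List.lookup "type" e == some "PER")) = true
      · have h1 : pvIsQual e = true := hq
        have h2 : pvIsDte e = false := by
          rcases Bool.or_eq_true_iff.mp hq with h | h <;>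
            simp_all [pvIsDte, beq_iff_eq]
        simp [hq, ih, h1, h2]
      · by_cases hd : (List.lookup "type" e == some "DTE") = true
        · have h1 : pvIsQual e = false := by simp [pvIsQual] at hq ⊢; tauto
          have h2 : pvIsDte e = true := hd
          simp [hq, hd, ih, h1, h2]
        · have h1 : pvIsQual e = false := by simp [pvIsQual] at hq ⊢; tauto
          have h2 : pvIsDte e = false := by simpa [pvIsDte] using hd
          simp [hq, hd, ih, h1, h2]

-- ===== VERDICT (by name: the statement is the Claim_ definition above) =====
theorem postpro_spec : Claim_equal_postpro := by
  intro entities _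
  unfold Spec_postpro postpro postpro_alt
  rw [pvMain entities PySem.Set.empty [] []]
  simp
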